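-- pv_equiv track=rewrite | github.com/convexica/india-fund-analytics | scripts/find_codes.py | find_best_code
-- ===== SOURCE A (Python) =====
-- def find_best_code(all_schemes, search_name):
--     # Ensure it's Direct Growth
--     options = []
--     for code, full_name in all_schemes.items():
--         if search_name.lower() in full_name.lower() and "direct" in full_name.lower() and "growth" in full_name.lower():
--             # Exclude IDCW/Bonus
--             if "idcw" not in full_name.lower() and "bonus" not in full_name.lower():
--                 options.append((code, full_name))
--
--     if not options:
--         return None, None
--
--     # Pick the one with shortest name or most standard "Direct Plan-Growth"
--     # Usually looking for "Direct Plan-Growth" or "Direct Growth"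
--     options.sort(key=lambda x: len(x[1]))
--     return options[0]
-- ===== SOURCE B (Python) =====
-- def find_best_code(all_schemes, search_name):
--     # One pass: keep the first shortest matching (code, name); no list, no sort.
--     best = (None, None)
--     best_len = None
--     for code, full_name in all_schemes.items():
--         low = full_name.lower()
--         if (search_name.lower() in low and "direct" in low and "growth" in low
--                 and "idcw" not in low and "bonus" not in low):
--             n = len(full_name)
--             if best_len is None or n < best_len:
--                 best = (code, full_name)
--                 best_len = n
--     return best
-- ===== Notes on version B (the rewrite author's own statement) =====
-- stated objective: simpler
-- what changed: Replaces build-list-then-stable-sort-by-length-and-take-head with a single pass that keeps a running best (first strictly-shortest matching name), so no intermediate list and no sort.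
import Mathlib
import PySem

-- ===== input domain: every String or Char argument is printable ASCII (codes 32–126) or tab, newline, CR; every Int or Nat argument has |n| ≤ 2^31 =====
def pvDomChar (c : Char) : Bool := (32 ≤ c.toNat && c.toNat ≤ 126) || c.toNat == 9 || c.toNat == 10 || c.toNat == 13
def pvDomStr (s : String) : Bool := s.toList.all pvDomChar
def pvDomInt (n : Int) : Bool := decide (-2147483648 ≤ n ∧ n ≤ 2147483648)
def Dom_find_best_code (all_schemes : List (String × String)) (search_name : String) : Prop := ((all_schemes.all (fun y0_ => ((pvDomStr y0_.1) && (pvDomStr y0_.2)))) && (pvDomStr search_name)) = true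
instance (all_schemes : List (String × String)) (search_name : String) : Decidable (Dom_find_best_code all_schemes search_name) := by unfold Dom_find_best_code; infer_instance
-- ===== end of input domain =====

-- B replaces A's build-list-then-stable-sort-by-name-length-then-take-head with a single
-- pass keeping a running best (first strictly shortest matching name): simpler, no sort.


-- shared guard: the substring filter both Pythons apply verbatim
def pvMatches (search_name full_name : String) : Bool :=
  let low := PySem.Str.lower full_name
  PySem.Str.isIn (PySem.Str.lower search_name) low &&
  PySem.Str.isIn "direct" low && PySem.Str.isIn "growth" low &&
  !PySem.Str.isIn "idcw" low && !PySem.Str.isIn "bonus" low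

-- ===== PORT A =====
def find_best_code (all_schemes : List (String × String)) (search_name : String) : Option String × Option String :=
  let options := all_schemes.foldl
    (fun acc p => if pvMatches search_name p.2 then acc ++ [p] else acc)
    ([] : List (String × String))
  if options.isEmpty then (none, none)
  else
    -- options.sort(key=lambda x: len(x[1])); return options[0] (guarded nonempty above)
    match (PySem.List.sorted options (fun x => PySem.Str.len x.2) false).head? with
    | some x => (some x.1, some x.2)
    | none => (none, none)

-- ===== PORT B =====
def find_best_code_alt (all_schemes : List (String × String)) (search_name : String) : Option String × Option String :=
  let r := all_schemes.foldl
    (fun (st : (Option String × Option String) × Option Int) p =>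
      if pvMatches search_name p.2 then
        let n := PySem.Str.len p.2
        match st.2 with
        | none => ((some p.1, some p.2), some n)
        | some m => if n < m then ((some p.1, some p.2), some n) else st
      else st)
    ((none, none), none)
  r.1

-- ===== PRECONDITION & SPEC =====
def Spec_find_best_code (all_schemes : List (String × String)) (search_name : String) (out : Option String × Option String) : Prop := out = find_best_code_alt all_schemes search_name
instance (all_schemes : List (String × String)) (search_name : String) (out : Option String × Option String) : Decidable (Spec_find_best_code all_schemes search_name out) := by unfold Spec_find_best_code; infer_instance

-- ===== CLAIM (what is proved, stated in full; the proofs are below) =====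
def Claim_equal_find_best_code : Prop := ∀ (all_schemes : List (String × String)) (search_name : String), Dom_find_best_code all_schemes search_name → Spec_find_best_code all_schemes search_name (find_best_code all_schemes search_name)

-- ===== LEMMAS AND PROOFS =====

-- head of an insertion step: the smaller (strictly, so ties keep the old head) of x and the old head
theorem pv_head_insertBy {α : Type} (before : α → α → Bool) (x : α) (ys : List α) :
    (PySem.List.insertBy before x ys).head? =
      some (match ys.head? with
            | none => x
            | some y => if before x y then x else y) := by
  cases ys with
  | nil => rfl
  | cons y t => simp only [PySem.List.insertBy, List.head?_cons]; split_ifs <;> rfl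

-- head of the whole insertion-sort fold is the running strict-min fold
theorem pv_head_foldl_insertBy {α : Type} (before : α → α → Bool) (l : List α) (acc : List α) :
    (l.foldl (fun a x => PySem.List.insertBy before x a) acc).head? =
      l.foldl (fun (h : Option α) x =>
        match h with
        | none => some x
        | some m => if before x m then some x else some m) acc.head? := by
  induction l generalizing acc with
  | nil => rfl
  | cons x t ih =>
      simp only [List.foldl_cons]
      rw [ih, pv_head_insertBy]
      cases acc with
      | nil => rfl
      | cons y ys => simp only [List.head?_cons]; split <;> rfl

-- head of the stable sort-by-key is PySem's min? (first minimal element)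
theorem pv_head_sorted {α : Type} (l : List α) (key : α → Int) :
    (PySem.List.sorted l key false).head? = PySem.List.min? l key := by
  rw [PySem.List.sorted_eq_foldl_insertBy, pv_head_foldl_insertBy]
  simp only [PySem.List.min?, List.head?_nil, decide_eq_true_eq]
  congr 1

-- B's fold over the filtered list computes min?, in encoded form
def pvEncode (o : Option (String × String)) : (Option String × Option String) × Option Int :=
  match o with
  | none => ((none, none), none)
  | some m => ((some m.1, some m.2), some (PySem.Str.len m.2))

theorem pv_fold_encode (l : List (String × String)) (o : Option (String × String)) :
    (l.foldl
      (fun (st : (Option String × Option String) × Option Int) p =>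
        let n := PySem.Str.len p.2
        match st.2 with
        | none => ((some p.1, some p.2), some n)
        | some m => if n < m then ((some p.1, some p.2), some n) else st)
      (pvEncode o)) =
    pvEncode (l.foldl
      (fun (h : Option (String × String)) x =>
        match h with
        | none => some x
        | some m => if PySem.Str.len x.2 < PySem.Str.len m.2 then some x else some m) o) := by
  induction l generalizing o with
  | nil => rfl
  | cons x t ih =>
      simp only [List.foldl_cons]
      rw [← ih]
      congr 1
      cases o with
      | none => rfl
      | some m => simp only [pvEncode]; split_ifs <;> rfl

-- B's running-min recurrence is PySem's min? (instances aligned pointwise)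
theorem pv_min?_eq (opts : List (String × String)) :
    opts.foldl
      (fun (h : Option (String × String)) x =>
        match h with
        | none => some x
        | some m => if PySem.Str.len x.2 < PySem.Str.len m.2 then some x else some m) none
      = PySem.List.min? opts (fun x => PySem.Str.len x.2) := by
  simp only [PySem.List.min?]
  congr 1
  funext h x
  cases h with
  | none => rfl
  | some m => exact if_congr Iff.rfl rfl rfl

-- ===== VERDICT (by name: the statement is the Claim_ definition above) =====
theorem find_best_code_spec : Claim_equal_find_best_code := by
  intro all_schemes search_name _
  unfold Spec_find_best_code
  have hA := PySem.List.foldl_append_if (fun p => pvMatches search_name p.2) id all_schemes []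
  simp only [id_eq, List.map_id, List.nil_append] at hA
  simp only [find_best_code, find_best_code_alt]
  rw [hA, ← List.foldl_filter,
      show (((none, none), none) : (Option String × Option String) × Option Int) = pvEncode none from rfl,
      pv_fold_encode, pv_head_sorted]
  set opts := all_schemes.filter (fun p => pvMatches search_name p.2) with hopts
  rw [pv_min?_eq opts]
  by_cases h : opts = []
  · rw [h]; rfl
  · simp only [List.isEmpty_eq_false_iff.mpr h]
    rcases ho : PySem.List.min? opts (fun x => PySem.Str.len x.2) with _ | m
    · exact absurd ((PySem.List.min?_eq_none_iff _ _).mp ho) h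
    · rfl
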